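-- pv_equiv track=rewrite | github.com/RenanErnest/SoftwareEngineerInterviewStudies | DataStructures/Trees.py | calculate_cost_of_building_a_full_binary_tree
-- ===== SOURCE A (Python) =====
-- def calculate_cost_of_building_a_full_binary_tree(arr):
--     cost = 0
--     while len(arr) > 1:
--         minimum = min(arr)
--         min_index = arr.index(minimum)
--         if min_index > 0 and min_index < len(arr)-1:
--             cost += arr[min_index] * min(arr[min_index-1], arr[min_index+1])
--         elif min_index < len(arr)-1:
--             cost += arr[min_index] * arr[min_index+1]
--         else:
--             cost += arr[min_index] * arr[min_index-1]
--         arr.pop(min_index) # removing the minimum value to prevent it to participate in future calculus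
--     return cost
-- ===== SOURCE B (Python) =====
-- def calculate_cost_of_building_a_full_binary_tree(arr):
--     cost = 0
--     stack = []
--     for x in arr:
--         while stack and x >= stack[-1]:
--             top = stack.pop()
--             cost += top * (min(x, stack[-1]) if stack else x)
--         stack.append(x)
--     while len(stack) > 1:
--         top = stack.pop()
--         cost += top * stack[-1]
--     return cost
-- ===== Notes on version B (the rewrite author's own statement) =====
-- stated objective: faster
-- what changed: A repeatedly scans the whole list for its minimum, finds its index and pops it (one pass per removed element); B does a single left-to-right pass with a monotonic decreasing stack, charging each element times min(incoming, element-below) when it is popped and settling the remaining stack at the end.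
import Mathlib
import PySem

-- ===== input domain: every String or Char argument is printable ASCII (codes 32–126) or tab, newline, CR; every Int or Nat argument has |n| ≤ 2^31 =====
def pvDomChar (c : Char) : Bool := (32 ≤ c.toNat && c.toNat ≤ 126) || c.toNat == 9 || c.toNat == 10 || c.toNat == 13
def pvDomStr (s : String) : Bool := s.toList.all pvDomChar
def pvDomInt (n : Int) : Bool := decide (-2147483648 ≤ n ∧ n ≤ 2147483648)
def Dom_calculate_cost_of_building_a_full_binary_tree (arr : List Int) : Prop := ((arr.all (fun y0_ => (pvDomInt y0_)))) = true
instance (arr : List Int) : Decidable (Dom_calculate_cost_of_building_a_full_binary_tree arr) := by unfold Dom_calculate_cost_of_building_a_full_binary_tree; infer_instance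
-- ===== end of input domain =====

-- B replaces A's repeated min-scan-and-pop loop with a one-pass monotonic stack.
-- NOTE: the Python A empties its argument list in place (arr.pop); the equivalence proved here is
-- about the RETURN value only (B does not mutate its argument).

-- ===== PORT A =====
-- literal transliteration of A: while len(arr) > 1: find min, its first index, pay, pop it
def calculate_cost_of_building_a_full_binary_tree.goA (arr : List Int) (cost : Int) : Int :=
  if _h : 1 < arr.length then
    match PySem.List.min? arr (fun x => x) with
    | none => cost            -- unreachable: arr is nonempty here (min(arr) cannot raise)
    | some m =>
      match PySem.List.index? arr m with
      | none => cost          -- unreachable: the minimum is a member of arr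
      | some i =>
        let pay : Int :=
          if 0 < i ∧ i + 1 < arr.length then
            PySem.List.pyGetD arr (i : Int) 0 *
              min (PySem.List.pyGetD arr ((i : Int) - 1) 0) (PySem.List.pyGetD arr ((i : Int) + 1) 0)
          else if i + 1 < arr.length then
            PySem.List.pyGetD arr (i : Int) 0 * PySem.List.pyGetD arr ((i : Int) + 1) 0
          else
            PySem.List.pyGetD arr (i : Int) 0 * PySem.List.pyGetD arr ((i : Int) - 1) 0
        match hp : PySem.List.pop? arr (i : Int) with
        | none => cost + pay  -- unreachable: i is a valid index
        | some r => calculate_cost_of_building_a_full_binary_tree.goA r.2 (cost + pay)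
  else cost
termination_by arr.length
decreasing_by
  have := PySem.List.length_of_pop?_eq_some arr hp; omega

def calculate_cost_of_building_a_full_binary_tree (arr : List Int) : Int :=
  calculate_cost_of_building_a_full_binary_tree.goA arr 0

-- ===== PORT B =====
-- the payment Source B makes when it pops `top` against incoming x: min(x, stack[-1]) if stack else x
def pvPay (rest : List Int) (x : Int) : Int :=
  match rest with
  | [] => x
  | t :: _ => min x t

-- Source B's inner 'while stack and x >= stack[-1]' loop (stack top = list head)
def pvPopLoop (stack : List Int) (cost : Int) (x : Int) : List Int × Int :=
  match stack with
  | [] => ([], cost)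
  | top :: rest =>
    if top ≤ x then pvPopLoop rest (cost + top * pvPay rest x) x
    else (top :: rest, cost)

-- one iteration of Source B's 'for x in arr' loop
def pvStep (sc : List Int × Int) (x : Int) : List Int × Int :=
  let p := pvPopLoop sc.1 sc.2 x
  (x :: p.1, p.2)

-- Source B's final 'while len(stack) > 1' loop
def pvCleanup (stack : List Int) (cost : Int) : Int :=
  match stack with
  | top :: t :: rest => pvCleanup (t :: rest) (cost + top * t)
  | _ => cost

def calculate_cost_of_building_a_full_binary_tree_alt (arr : List Int) : Int :=
  let p := arr.foldl pvStep ([], 0)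
  pvCleanup p.1 p.2

-- ===== PRECONDITION & SPEC =====
def Spec_calculate_cost_of_building_a_full_binary_tree (arr : List Int) (out : Int) : Prop := out = calculate_cost_of_building_a_full_binary_tree_alt arr
instance (arr : List Int) (out : Int) : Decidable (Spec_calculate_cost_of_building_a_full_binary_tree arr out) := by unfold Spec_calculate_cost_of_building_a_full_binary_tree; infer_instance

-- ===== CLAIM (what is proved, stated in full; the proofs are below) =====
def Claim_equal_calculate_cost_of_building_a_full_binary_tree : Prop := ∀ (arr : List Int), Dom_calculate_cost_of_building_a_full_binary_tree arr → Spec_calculate_cost_of_building_a_full_binary_tree arr (calculate_cost_of_building_a_full_binary_tree arr)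

-- ===== LEMMAS AND PROOFS =====

-- what A pays for the step that removes the (first) minimum m of P ++ m :: S
def pvMinPay (P S : List Int) (m : Int) : Int :=
  match S with
  | y :: _ => match P with | [] => m * y | _ :: _ => m * min y (P.getLastD 0)
  | [] => m * P.getLastD 0

theorem pvGetLastD_eq (P : List Int) (h : P ≠ []) (d : Int) :
    P.getLastD d = P.getLast h := by
  rw [List.getLastD_eq_getLast?, List.getLast?_eq_some_getLast h]; rfl

-- cost-additivity of the three loops of B
theorem pvPopLoop_add (s : List Int) (c d x : Int) :
    pvPopLoop s (c + d) x = ((pvPopLoop s c x).1, (pvPopLoop s c x).2 + d) := by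
  induction s generalizing c with
  | nil => simp [pvPopLoop]
  | cons top rest ih =>
      simp only [pvPopLoop]
      split_ifs with h
      · rw [show c + d + top * pvPay rest x = (c + top * pvPay rest x) + d by ring]
        exact ih _
      · rfl

theorem pvStep_add (s : List Int) (c d x : Int) :
    pvStep (s, c + d) x = ((pvStep (s, c) x).1, (pvStep (s, c) x).2 + d) := by
  simp [pvStep, pvPopLoop_add]

theorem pvFoldl_add (L : List Int) (s : List Int) (c d : Int) :
    L.foldl pvStep (s, c + d) = ((L.foldl pvStep (s, c)).1, (L.foldl pvStep (s, c)).2 + d) := by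
  induction L generalizing s c with
  | nil => rfl
  | cons y t ih =>
      simp only [List.foldl_cons]
      rw [pvStep_add, ih]

theorem pvCleanup_add (s : List Int) (c d : Int) :
    pvCleanup s (c + d) = pvCleanup s c + d := by
  induction s generalizing c with
  | nil => rfl
  | cons top rest ih =>
      cases rest with
      | nil => rfl
      | cons t r =>
          simp only [pvCleanup]
          rw [show c + d + top * t = (c + top * t) + d by ring, ih]

-- pushing an element smaller than everything on the stack pops nothing
theorem pvPopLoop_small (s : List Int) (c x : Int) (h : ∀ t ∈ s, x < t) :
    pvPopLoop s c x = (s, c) := by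
  cases s with
  | nil => rfl
  | cons top rest =>
      have : ¬ top ≤ x := by have := h top (by simp); omega
      simp [pvPopLoop, this]

-- popping the minimum
theorem pvPopLoop_pop (s : List Int) (c m x : Int) (h : m ≤ x) :
    pvPopLoop (m :: s) c x = pvPopLoop s (c + m * pvPay s x) x := by
  simp [pvPopLoop, h]

-- every element of the stack left by the pop loop was on the stack before
theorem pvPopLoop_subset (s : List Int) (c x : Int) :
    ∀ t ∈ (pvPopLoop s c x).1, t ∈ s := by
  induction s generalizing c with
  | nil => simp [pvPopLoop]
  | cons top rest ih =>
      intro t ht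
      simp only [pvPopLoop] at ht
      split_ifs at ht with h
      · exact List.mem_cons_of_mem _ (ih _ t ht)
      · exact ht

-- every element of the stack after folding P came from the initial stack or from P
theorem pvStack_mem (P : List Int) (s : List Int) (c : Int) :
    ∀ t ∈ (P.foldl pvStep (s, c)).1, t ∈ s ∨ t ∈ P := by
  induction P generalizing s c with
  | nil => intro t ht; exact Or.inl ht
  | cons y P' ih =>
      intro t ht
      simp only [List.foldl_cons] at ht
      rcases ih (pvStep (s, c) y).1 (pvStep (s, c) y).2 t (by simpa using ht) with h | h
      · rcases List.mem_cons.mp (by simpa [pvStep] using h) with h | h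
        · exact Or.inr (h ▸ List.mem_cons_self)
        · exact Or.inl (pvPopLoop_subset s c y t h)
      · exact Or.inr (List.mem_cons_of_mem _ h)

-- after folding a list ending in p, the stack starts with p
theorem pvStack_head (P' : List Int) (p : Int) (s : List Int) (c : Int) :
    ∃ s', ((P' ++ [p]).foldl pvStep (s, c)).1 = p :: s' := by
  rw [List.foldl_append]
  exact ⟨_, rfl⟩

-- THE decomposition: B on P ++ m :: S = (what A pays for removing m) + B on P ++ S
theorem pvAlt_decomp (P S : List Int) (m : Int)
    (hP : ∀ t ∈ P, m < t) (hS : ∀ t ∈ S, m ≤ t) (hne : P ≠ [] ∨ S ≠ []) :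
    calculate_cost_of_building_a_full_binary_tree_alt (P ++ m :: S)
      = pvMinPay P S m + calculate_cost_of_building_a_full_binary_tree_alt (P ++ S) := by
  unfold calculate_cost_of_building_a_full_binary_tree_alt
  obtain ⟨s, c, hq⟩ : ∃ s c, P.foldl pvStep ([], 0) = (s, c) := ⟨_, _, rfl⟩
  have hsP : ∀ t ∈ s, t ∈ P := by
    intro t ht
    rcases pvStack_mem P [] 0 t (by rw [hq]; exact ht) with h | h
    · simp at h
    · exact h
  have hsm : ∀ t ∈ s, m < t := fun t ht => hP t (hsP t ht)
  have hpush : pvStep (s, c) m = (m :: s, c) := by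
    simp [pvStep, pvPopLoop_small s c m hsm]
  have hshape : ∀ h : P ≠ [], ∃ s', s = P.getLast h :: s' := by
    intro h
    obtain ⟨s', hs'⟩ := pvStack_head P.dropLast (P.getLast h) [] 0
    rw [List.dropLast_concat_getLast h, hq] at hs'
    exact ⟨s', hs'⟩
  cases S with
  | nil =>
      have hPne : P ≠ [] := by tauto
      obtain ⟨s', hs'⟩ := hshape hPne
      rw [List.foldl_append, hq, List.foldl_cons, hpush, List.foldl_nil]
      simp only [List.append_nil, hq, hs', pvCleanup, pvMinPay]
      rw [pvCleanup_add]
      rw [pvGetLastD_eq P hPne 0]; ring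
  | cons y S' =>
      have hmy : m ≤ y := hS y (by simp)
      rw [List.foldl_append, hq, List.foldl_cons, hpush, List.foldl_cons]
      have hstep : pvStep (m :: s, c) y = pvStep (s, c + m * pvPay s y) y := by
        simp [pvStep, pvPopLoop_pop s c m y hmy]
      rw [hstep]
      rw [show pvStep (s, c + m * pvPay s y) y
            = ((pvStep (s, c) y).1, (pvStep (s, c) y).2 + m * pvPay s y) from pvStep_add s c _ y]
      rw [pvFoldl_add, pvCleanup_add]
      rw [List.foldl_append, hq, List.foldl_cons]
      have hpay : m * pvPay s y = pvMinPay P (y :: S') m := by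
        cases hP' : P with
        | nil =>
            have : s = [] := by
              cases s with
              | nil => rfl
              | cons a s'' => exact absurd (hsP a (by simp)) (by simp [hP'])
            simp [this, pvPay, pvMinPay]
        | cons p0 P0 =>
            have hPne : P ≠ [] := by simp [hP']
            obtain ⟨s', hs'⟩ := hshape hPne
            simp only [hs', pvPay, pvMinPay, ← hP', pvGetLastD_eq P hPne 0]
      rw [hpay]; ring

-- getD facts about the decomposition L = P ++ m :: S
theorem pvGetD_append_self (P S : List Int) (m d : Int) :
    (P ++ m :: S).getD P.length d = m := by
  induction P with
  | nil => rfl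
  | cons p P' ih => simpa using ih

theorem pvGetD_append_succ (P S : List Int) (m d : Int) :
    (P ++ m :: S).getD (P.length + 1) d = S.getD 0 d := by
  induction P with
  | nil => rfl
  | cons p P' ih => simpa using ih

theorem pvGetD_last (P : List Int) (d : Int) (h : P ≠ []) :
    P.getD (P.length - 1) d = P.getLastD d := by
  induction P with
  | nil => simp at h
  | cons p P' ih =>
      cases P' with
      | nil => rfl
      | cons q Q => simpa using ih (by simp)

-- A's loop, run to the end, equals B plus the accumulated cost
theorem pvGoA_eq (n : Nat) : ∀ (L : List Int) (c : Int), L.length ≤ n →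
    calculate_cost_of_building_a_full_binary_tree.goA L c
      = c + calculate_cost_of_building_a_full_binary_tree_alt L := by
  induction n with
  | zero =>
      intro L c hL
      have : L = [] := List.length_eq_zero_iff.mp (Nat.le_zero.mp hL)
      subst this
      simp [calculate_cost_of_building_a_full_binary_tree.goA,
            calculate_cost_of_building_a_full_binary_tree_alt, pvCleanup]
  | succ n ih =>
      intro L c hL
      by_cases hlen : 1 < L.length
      · -- the loop body runs
        obtain ⟨m, hm⟩ : ∃ m, PySem.List.min? L (fun x => x) = some m := by
          cases h : PySem.List.min? L (fun x => x) with
          | none =>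
              have : L = [] := (PySem.List.min?_eq_none_iff L _).mp h
              simp [this] at hlen
          | some m => exact ⟨m, rfl⟩
        have hmem : m ∈ L := PySem.List.min?_mem hm
        have hmin : ∀ y ∈ L, m ≤ y := PySem.List.min?_isMin hm
        obtain ⟨i, hi⟩ : ∃ i, PySem.List.index? L m = some i := by
          cases h : PySem.List.index? L m with
          | none => exact absurd ((PySem.List.index?_eq_none_iff L m).mp h) (by simpa using hmem)
          | some i => exact ⟨i, rfl⟩
        obtain ⟨P, S, hLPS, hPlen, hmP⟩ := (PySem.List.index?_eq_some_iff L m i).mp hi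
        subst hPlen
        have hP : ∀ t ∈ P, m < t := by
          intro t ht
          have h1 : m ≤ t := hmin t (by rw [hLPS]; exact List.mem_append_left _ ht)
          have h2 : t ≠ m := fun h => hmP (h ▸ ht)
          omega
        have hS : ∀ t ∈ S, m ≤ t := fun t ht => hmin t (by
          rw [hLPS]; exact List.mem_append_right _ (List.mem_cons_of_mem _ ht))
        have hiL : P.length < L.length := by rw [hLPS]; simp
        have hpop : PySem.List.pop? L (P.length : Int)
            = some (L[P.length], L.eraseIdx P.length) :=
          PySem.List.pop?_natCast L P.length hiL
        have herase : L.eraseIdx P.length = P ++ S := by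
          rw [hLPS]
          simp [List.eraseIdx_append_of_length_le]
        have hlenL : L.length = P.length + 1 + S.length := by rw [hLPS]; simp; omega
        -- unfold one iteration of A
        rw [calculate_cost_of_building_a_full_binary_tree.goA]
        simp only [hlen, dite_true, hm, hi]
        have hgm : PySem.List.pyGetD L (P.length : Int) 0 = m := by
          rw [PySem.List.pyGetD_natCast, hLPS, pvGetD_append_self]
        have hpay :
            (if 0 < P.length ∧ P.length + 1 < L.length then
              PySem.List.pyGetD L (P.length : Int) 0 *
                min (PySem.List.pyGetD L ((P.length : Int) - 1) 0)
                    (PySem.List.pyGetD L ((P.length : Int) + 1) 0)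
            else if P.length + 1 < L.length then
              PySem.List.pyGetD L (P.length : Int) 0 * PySem.List.pyGetD L ((P.length : Int) + 1) 0
            else
              PySem.List.pyGetD L (P.length : Int) 0 * PySem.List.pyGetD L ((P.length : Int) - 1) 0)
            = pvMinPay P S m := by
          have hg1 : PySem.List.pyGetD L ((P.length : Int) + 1) 0 = L.getD (P.length + 1) 0 := by
            rw [show ((P.length : Int) + 1) = ((P.length + 1 : Nat) : Int) by push_cast; ring,
                PySem.List.pyGetD_natCast]
          have hsucc : L.getD (P.length + 1) 0 = S.getD 0 0 := by
            rw [hLPS, pvGetD_append_succ]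
          by_cases h0 : 0 < P.length
          · have hg2 : PySem.List.pyGetD L ((P.length : Int) - 1) 0 = L.getD (P.length - 1) 0 := by
              rw [show ((P.length : Int) - 1) = ((P.length - 1 : Nat) : Int) by omega,
                  PySem.List.pyGetD_natCast]
            have hPne : P ≠ [] := by intro h; rw [h] at h0; simp at h0
            have hprev : L.getD (P.length - 1) 0 = P.getLastD 0 := by
              rw [hLPS, List.getD_append _ _ _ _ (by omega), pvGetD_last P 0 hPne]
            by_cases h1 : P.length + 1 < L.length
            · have hSne : S ≠ [] := by intro h; rw [h] at hlenL; simp at hlenL; omega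
              obtain ⟨y, S', rfl⟩ := List.exists_cons_of_ne_nil hSne
              obtain ⟨p0, P0, rfl⟩ := List.exists_cons_of_ne_nil hPne
              simp only [if_pos (And.intro h0 h1), hgm, hg1, hg2, hsucc, hprev, pvMinPay]
              simp [min_comm]
            · have hSe : S = [] := by
                have : S.length = 0 := by omega
                exact List.length_eq_zero_iff.mp this
              subst hSe
              simp only [if_neg (by omega : ¬ (0 < P.length ∧ P.length + 1 < L.length)),
                if_neg h1, hgm, hg2, hprev, pvMinPay]
          · have hPe : P = [] := List.length_eq_zero_iff.mp (by omega)
            subst hPe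
            have h1 : ([] : List Int).length + 1 < L.length := by simpa using hlen
            have hSne : S ≠ [] := by intro h; rw [h] at hlenL; simp at hlenL; omega
            obtain ⟨y, S', rfl⟩ := List.exists_cons_of_ne_nil hSne
            simp only [if_neg (by omega : ¬ (0 < ([] : List Int).length ∧ ([] : List Int).length + 1 < L.length)),
              if_pos h1, hgm, hg1, hsucc, pvMinPay]
            simp
        rw [hpay]
        have hlt : (P ++ S).length ≤ n := by
          have := List.length_eraseIdx_of_lt hiL
          rw [herase] at this; omega
        split
        · next hnone => rw [hpop] at hnone; cases hnone
        · next r hr =>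
            rw [hpop] at hr
            have hr2 : r.2 = P ++ S := by
              have := (Option.some.injEq _ _).mp hr
              rw [← this, ← herase]
            rw [hr2, ih (P ++ S) (c + pvMinPay P S m) hlt]
            have hdec := pvAlt_decomp P S m hP hS (by
              rcases List.eq_nil_or_concat P with h | h
              · right; intro h'; rw [h, h'] at hlenL; simp at hlenL; omega
              · left; rcases h with ⟨_, _, rfl⟩; simp)
            rw [hLPS, hdec]; ring
      · -- len(arr) <= 1: A returns cost, B computes 0
        rw [calculate_cost_of_building_a_full_binary_tree.goA]
        simp only [hlen, dite_false]
        have : calculate_cost_of_building_a_full_binary_tree_alt L = 0 := by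
          match L, hlen with
          | [], _ => rfl
          | [x], _ => rfl
          | x :: y :: t, h => simp at h
        rw [this]; ring

-- ===== VERDICT (by name: the statement is the Claim_ definition above) =====
theorem calculate_cost_of_building_a_full_binary_tree_spec : Claim_equal_calculate_cost_of_building_a_full_binary_tree := by
  intro arr _
  unfold Spec_calculate_cost_of_building_a_full_binary_tree
  unfold calculate_cost_of_building_a_full_binary_tree
  rw [pvGoA_eq arr.length arr 0 le_rfl]
  ring
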